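-- pv_equiv track=rewrite | github.com/Rorschach3/credit-clarity | backend/utils/credit_bureau_detector.py | get_bureau_sections
-- ===== SOURCE A (Python) =====
-- def get_bureau_sections(text_content: str) -> dict:
--     """
--     Split text content into sections by credit bureau.
--
--     Returns:
--         dict: {bureau_name: text_section}
--     """
--     if not text_content:
--         return {}
--
--     sections = {}
--     lines = text_content.split('\n')
--     current_bureau = "Unknown"
--     current_section = []
--
--     for line in lines:
--         line_lower = line.lower()
--
--         # Check if this line indicates a new bureau section
--         if "equifax" in line_lower:
--             if current_section:
--                 sections[current_bureau] = '\n'.join(current_section)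
--             current_bureau = "Equifax"
--             current_section = [line]
--         elif "experian" in line_lower:
--             if current_section:
--                 sections[current_bureau] = '\n'.join(current_section)
--             current_bureau = "Experian"
--             current_section = [line]
--         elif "transunion" in line_lower or "trans union" in line_lower:
--             if current_section:
--                 sections[current_bureau] = '\n'.join(current_section)
--             current_bureau = "TransUnion"
--             current_section = [line]
--         else:
--             current_section.append(line)
--
--     # Add the last section
--     if current_section:
--         sections[current_bureau] = '\n'.join(current_section)
--
--     return sections
-- ===== SOURCE B (Python) =====
-- def _bureau_of(line):
--     l = line.lower()
--     if "equifax" in l: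
--         return "Equifax"
--     if "experian" in l:
--         return "Experian"
--     if "transunion" in l or "trans union" in l:
--         return "TransUnion"
--     return None
--
--
-- def _leading_plain(lines):
--     """Longest prefix of lines that contains no bureau marker."""
--     out = []
--     for line in lines:
--         if _bureau_of(line) is not None:
--             break
--         out.append(line)
--     return out
--
--
-- def get_bureau_sections(text_content: str) -> dict:
--     if not text_content:
--         return {}
--     lines = text_content.split('\n')
--     sections = {}
--     pre = _leading_plain(lines)
--     if pre:
--         sections["Unknown"] = '\n'.join(pre)
--     rest = lines[len(pre):]
--     while rest:
--         # rest[0] starts a marker-headed segment; the default only totalizes the lookup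
--         name = _bureau_of(rest[0]) or "Unknown"
--         seg = [rest[0]] + _leading_plain(rest[1:])
--         sections[name] = '\n'.join(seg)
--         rest = rest[len(seg):]
--     return sections
-- ===== Notes on version B (the rewrite author's own statement) =====
-- stated objective: alternative
-- what changed: Replaced A's single accumulator-carrying fold (current_bureau/current_section state with flush-on-marker) by a two-phase segmentation: classify lines with one helper, take the leading unmarked prefix as the optional 'Unknown' section, then repeatedly slice off one marker-headed segment and insert it; no running section/bureau state is threaded.
import Mathlib
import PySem

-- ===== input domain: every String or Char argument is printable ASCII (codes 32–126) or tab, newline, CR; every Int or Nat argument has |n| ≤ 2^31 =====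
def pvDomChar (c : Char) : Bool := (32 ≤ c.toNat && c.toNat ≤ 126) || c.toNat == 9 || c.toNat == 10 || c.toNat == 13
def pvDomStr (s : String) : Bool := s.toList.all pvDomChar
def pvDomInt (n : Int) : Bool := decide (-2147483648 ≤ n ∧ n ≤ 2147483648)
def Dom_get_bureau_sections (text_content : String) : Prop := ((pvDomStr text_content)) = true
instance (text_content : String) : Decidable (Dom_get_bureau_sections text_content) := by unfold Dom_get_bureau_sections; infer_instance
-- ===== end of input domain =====

-- B replaces A's accumulator-carrying fold by two-phase marker segmentation (same values; no speed claim).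

-- ===== PORT A =====
-- A's loop body: state is (sections, current_bureau, current_section)
def pvBureauStep (st : PySem.Dict String String × String × List String) (line : String) :
    PySem.Dict String String × String × List String :=
  let sections := st.1
  let current_bureau := st.2.1
  let current_section := st.2.2
  let line_lower := PySem.Str.lower line
  if PySem.Str.isIn "equifax" line_lower then
    ((if current_section ≠ [] then sections.insert current_bureau (PySem.Str.join "\n" current_section) else sections),
     "Equifax", [line])
  else if PySem.Str.isIn "experian" line_lower then
    ((if current_section ≠ [] then sections.insert current_bureau (PySem.Str.join "\n" current_section) else sections),
     "Experian", [line])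
  else if PySem.Str.isIn "transunion" line_lower || PySem.Str.isIn "trans union" line_lower then
    ((if current_section ≠ [] then sections.insert current_bureau (PySem.Str.join "\n" current_section) else sections),
     "TransUnion", [line])
  else
    (sections, current_bureau, current_section ++ [line])

def get_bureau_sections (text_content : String) : List (String × String) :=
  if text_content = "" then []
  else
    let lines := (PySem.Str.split? text_content "\n").getD []
    let st := lines.foldl pvBureauStep (PySem.Dict.empty, "Unknown", [])
    (if st.2.2 ≠ [] then st.1.insert st.2.1 (PySem.Str.join "\n" st.2.2) else st.1).items

-- ===== PORT B =====
def pvBureauOf (line : String) : Option String :=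
  let l := PySem.Str.lower line
  if PySem.Str.isIn "equifax" l then some "Equifax"
  else if PySem.Str.isIn "experian" l then some "Experian"
  else if PySem.Str.isIn "transunion" l || PySem.Str.isIn "trans union" l then some "TransUnion"
  else none

-- _leading_plain: loop with break = longest unmarked prefix
def pvLeadingPlain : List String → List String
  | [] => []
  | l :: rest => if (pvBureauOf l).isSome then [] else l :: pvLeadingPlain rest

theorem pvLeadingPlain_length_le : ∀ (ls : List String), (pvLeadingPlain ls).length ≤ ls.length := by
  intro ls
  induction ls with
  | nil => simp [pvLeadingPlain]
  | cons l rest ih =>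
    simp only [pvLeadingPlain]
    split
    · simp
    · simpa using Nat.succ_le_succ ih

-- the while-loop over rest
def pvBuild (sections : PySem.Dict String String) (rest : List String) : PySem.Dict String String :=
  match rest with
  | [] => sections
  | r0 :: rtail =>
    let name := (pvBureauOf r0).getD "Unknown"
    let seg := r0 :: pvLeadingPlain rtail
    pvBuild (sections.insert name (PySem.Str.join "\n" seg)) ((r0 :: rtail).drop seg.length)
termination_by rest.length
decreasing_by
  simp only [List.length_cons, List.drop_succ_cons, List.length_drop]
  have := pvLeadingPlain_length_le rtail
  omega

def get_bureau_sections_alt (text_content : String) : List (String × String) :=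
  if text_content = "" then []
  else
    let lines := (PySem.Str.split? text_content "\n").getD []
    let pre := pvLeadingPlain lines
    let sections : PySem.Dict String String :=
      if pre ≠ [] then (PySem.Dict.empty).insert "Unknown" (PySem.Str.join "\n" pre) else PySem.Dict.empty
    (pvBuild sections (lines.drop pre.length)).items

-- ===== PRECONDITION & SPEC =====
def Spec_get_bureau_sections (text_content : String) (out : List (String × String)) : Prop := out = get_bureau_sections_alt text_content
instance (text_content : String) (out : List (String × String)) : Decidable (Spec_get_bureau_sections text_content out) := by unfold Spec_get_bureau_sections; infer_instance

-- ===== CLAIM (what is proved, stated in full; the proofs are below) =====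
def Claim_equal_get_bureau_sections : Prop := ∀ (text_content : String), Dom_get_bureau_sections text_content → Spec_get_bureau_sections text_content (get_bureau_sections text_content)

-- ===== LEMMAS AND PROOFS =====

-- A's step, expressed through B's classifier
theorem pvStep_eq (sec : PySem.Dict String String) (b : String) (cur : List String) (line : String) :
    pvBureauStep (sec, b, cur) line =
      match pvBureauOf line with
      | some nb => ((if cur ≠ [] then sec.insert b (PySem.Str.join "\n" cur) else sec), nb, [line])
      | none => (sec, b, cur ++ [line]) := by
  simp only [pvBureauStep, pvBureauOf]
  split_ifs <;> rfl

def pvFinish (st : PySem.Dict String String × String × List String) : PySem.Dict String String :=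
  if st.2.2 ≠ [] then st.1.insert st.2.1 (PySem.Str.join "\n" st.2.2) else st.1

-- folding A's step over unmarked lines just appends them to the current section
theorem pvFold_plain (p : List String) (h : ∀ l ∈ p, pvBureauOf l = none) :
    ∀ (sec : PySem.Dict String String) (b : String) (cur : List String),
      p.foldl pvBureauStep (sec, b, cur) = (sec, b, cur ++ p) := by
  induction p with
  | nil => intro sec b cur; simp
  | cons m t ih =>
    intro sec b cur
    have hm : pvBureauOf m = none := h m (List.mem_cons_self ..)
    have ht : ∀ l ∈ t, pvBureauOf l = none := fun l hl => h l (List.mem_cons_of_mem _ hl)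
    simp only [List.foldl_cons, pvStep_eq, hm]
    rw [ih ht]
    simp

-- main invariant: with a non-empty current section, finishing A's fold over ls
-- is B's segmentation of ls continued from the flushed state
theorem pvMain (ls : List String) :
    ∀ (sec : PySem.Dict String String) (b : String) (cur : List String), cur ≠ [] →
      pvFinish (ls.foldl pvBureauStep (sec, b, cur)) =
        pvBuild (sec.insert b (PySem.Str.join "\n" (cur ++ pvLeadingPlain ls)))
          (ls.drop (pvLeadingPlain ls).length) := by
  induction ls with
  | nil =>
    intro sec b cur hcur
    simp [pvFinish, pvBuild, pvLeadingPlain, hcur]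
  | cons m t ih =>
    intro sec b cur hcur
    cases hm : pvBureauOf m with
    | none =>
      simp only [List.foldl_cons, pvStep_eq, hm]
      rw [ih sec b (cur ++ [m]) (by simp)]
      simp only [pvLeadingPlain, hm, Option.isSome_none, Bool.false_eq_true,
        List.append_assoc, List.singleton_append]
      rfl
    | some nb =>
      simp only [List.foldl_cons, pvStep_eq, hm, if_pos hcur]
      rw [ih _ nb [m] (by simp)]
      conv_rhs =>
        rw [show pvLeadingPlain (m :: t) = [] by simp [pvLeadingPlain, hm]]
      simp only [List.length_nil, List.drop_zero]
      rw [pvBuild]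
      simp [hm]

theorem pvLeadingPlain_mem_none : ∀ (ls : List String), ∀ l ∈ pvLeadingPlain ls, pvBureauOf l = none := by
  intro ls
  induction ls with
  | nil => simp [pvLeadingPlain]
  | cons m t ih =>
    simp only [pvLeadingPlain]
    split
    · simp
    · intro l hl
      rcases List.mem_cons.mp hl with h | h
      · subst h
        rcases hp : pvBureauOf l with _ | nb
        · rfl
        · simp [hp] at *
      · exact ih l h

theorem pvDropLeading_head : ∀ (ls : List String),
    ls.drop (pvLeadingPlain ls).length = [] ∨
      ∃ m t, ls.drop (pvLeadingPlain ls).length = m :: t ∧ (pvBureauOf m).isSome := by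
  intro ls
  induction ls with
  | nil => simp [pvLeadingPlain]
  | cons m t ih =>
    by_cases hm : (pvBureauOf m).isSome
    · right
      exact ⟨m, t, by simp [pvLeadingPlain, hm], hm⟩
    · simpa [pvLeadingPlain, hm] using ih

theorem pvTakeDrop (ls : List String) : pvLeadingPlain ls ++ ls.drop (pvLeadingPlain ls).length = ls := by
  induction ls with
  | nil => simp [pvLeadingPlain]
  | cons m t ih =>
    by_cases hm : (pvBureauOf m).isSome <;> simp [pvLeadingPlain, hm, ih]

-- ===== VERDICT (by name: the statement is the Claim_ definition above) =====
theorem get_bureau_sections_spec : Claim_equal_get_bureau_sections := by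
  intro text_content _
  unfold Spec_get_bureau_sections
  unfold get_bureau_sections get_bureau_sections_alt
  by_cases hempty : text_content = ""
  · simp [hempty]
  · simp only [if_neg hempty]
    set lines := (PySem.Str.split? text_content "\n").getD [] with hlines
    set pre := pvLeadingPlain lines with hpre
    set rest := lines.drop pre.length with hrest
    have hsplit : pre ++ rest = lines := pvTakeDrop lines
    have hplain : ∀ l ∈ pre, pvBureauOf l = none := pvLeadingPlain_mem_none lines
    have hfold1 : lines.foldl pvBureauStep (PySem.Dict.empty, "Unknown", []) =
        rest.foldl pvBureauStep (PySem.Dict.empty, "Unknown", pre) := by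
      rw [← hsplit, List.foldl_append, pvFold_plain pre hplain]
      simp
    rcases pvDropLeading_head lines with hr | ⟨m, t, hr, hm⟩
    · -- rest = []
      rw [← hrest] at hr
      rw [hfold1, hr]
      simp only [List.foldl_nil]
      by_cases hp : pre = []
      · simp [pvBuild, hp]
      · simp [pvBuild, hp]
    · rw [← hrest] at hr
      rcases hmb : pvBureauOf m with _ | nb
      · rw [hmb] at hm; simp at hm
      · by_cases hp : pre = []
        · -- first line is a marker: A's first step does not flush (empty section)
          rw [hfold1, hr]
          simp only [List.foldl_cons, pvStep_eq, hp, ne_eq, not_true_eq_false, if_false, hmb]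
          have hmain := pvMain t PySem.Dict.empty nb [m] (by simp)
          simp only [pvFinish, ne_eq] at hmain
          rw [hmain]
          conv_rhs => rw [pvBuild]
          simp [hmb]
        · have hmain := pvMain rest PySem.Dict.empty "Unknown" pre hp
          simp only [pvFinish, ne_eq] at hmain
          rw [hfold1, hmain]
          have hlp : pvLeadingPlain rest = [] := by
            rw [hr]; simp [pvLeadingPlain, hmb]
          simp [hp, hlp]
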